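-- pv_equiv track=rewrite | github.com/opethe1st/CompetitiveProgramming | Codility/2018/zinc.py | solution
-- ===== SOURCE A (Python) =====
-- def solution(A):
--     MODULO = 1000000007
--     N = len(A)
--     if len(A) < 3:
--         return 0
--     dp = [[0 for i in range(N+1)] for i in range(4)]
--     M = set()
--     for n in range(1, N+1):
--         M.add(A[n-1])
--         dp[1][n] = len(M)
--     for k in range(2, 4):
--         dp[k][k] = 1
--         count_k_group_end_with_num_dict = {}
--         count_k_group_end_with_num_dict[A[k-1]] = 1
--         for n in range(k+1, N+1):
--             w = dp[k-1][n-1] - count_k_group_end_with_num_dict.get(A[n-1], 0)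
--             dp[k][n] = (dp[k][n-1] + w)%MODULO
--             count_k_group_end_with_num_dict[A[n-1]] = (count_k_group_end_with_num_dict.get(A[n-1], 0) + w)%MODULO
--     return dp[3][N]
-- ===== SOURCE B (Python) =====
-- def solution(A):
--     # Single pass with rolling per-length accumulators instead of a 2-D dp table with staged loops.
--     if len(A) < 3:
--         return 0
--     MOD = 1000000007
--     c1 = 0
--     c2 = 0
--     c3 = 0
--     seen = set()
--     last2 = {}
--     last3 = {}
--     n = 0
--     for x in A:
--         n += 1
--         if n == 3:
--             c3 = 1
--             last3 = {x: 1}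
--         elif n > 3:
--             w = c2 - last3.get(x, 0)
--             c3 = (c3 + w) % MOD
--             last3[x] = (last3.get(x, 0) + w) % MOD
--         if n == 2:
--             c2 = 1
--             last2 = {x: 1}
--         elif n > 2:
--             w = c1 - last2.get(x, 0)
--             c2 = (c2 + w) % MOD
--             last2[x] = (last2.get(x, 0) + w) % MOD
--         seen.add(x)
--         c1 = len(seen)
--     return c3
-- ===== Notes on version B (the rewrite author's own statement) =====
-- stated objective: alternative
-- what changed: Replaces the (4)x(N+1) dp table and the three sequential stage loops by a single pass over A that maintains rolling counts c1,c2,c3 of distinct subsequences of lengths 1..3 together with one last-contribution dict per length, updating length 3 before length 2 before 1 within each step.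
import Mathlib
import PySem

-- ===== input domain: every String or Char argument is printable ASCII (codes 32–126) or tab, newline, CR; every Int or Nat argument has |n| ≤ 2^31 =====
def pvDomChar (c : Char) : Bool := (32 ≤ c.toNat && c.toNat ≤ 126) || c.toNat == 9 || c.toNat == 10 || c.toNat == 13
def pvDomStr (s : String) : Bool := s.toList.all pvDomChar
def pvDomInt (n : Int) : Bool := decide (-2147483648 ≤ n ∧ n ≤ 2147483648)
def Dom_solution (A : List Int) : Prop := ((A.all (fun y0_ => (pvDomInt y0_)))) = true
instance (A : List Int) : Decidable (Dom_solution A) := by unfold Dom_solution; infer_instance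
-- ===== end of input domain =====

-- B replaces A's 2-D dp table and three staged loops by a single pass with rolling accumulators (objective: alternative, same cost).

-- ===== PORT A =====
-- dp[i][j] read / dp[i][j] = v write (indices are always in range here)
def pvGet2 (dp : List (List Int)) (i j : Int) : Int :=
  PySem.List.pyGetD (PySem.List.pyGetD dp i []) j 0

def pvSet2 (dp : List (List Int)) (i j : Int) (v : Int) : List (List Int) :=
  PySem.List.pySetD dp i (PySem.List.pySetD (PySem.List.pyGetD dp i []) j v)

-- dp = [[0 for i in range(N+1)] for i in range(4)]
def aInit (N : Int) : List (List Int) :=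
  (PySem.List.pyRange 0 4 1).map (fun _ => (PySem.List.pyRange 0 (N+1) 1).map (fun _ => (0:Int)))

-- body of "for n in range(1, N+1): M.add(A[n-1]); dp[1][n] = len(M)"
def aLoop1 (A : List Int) (s : List (List Int) × PySem.Set Int) (n : Int) :
    List (List Int) × PySem.Set Int :=
  let M := PySem.Set.add s.2 (PySem.List.pyGetD A (n-1) 0)
  (pvSet2 s.1 1 n ((M.length : Int)), M)

-- body of the inner "for n in range(k+1, N+1)" loop of stage k
def aInner (A : List Int) (k : Int) (s : List (List Int) × PySem.Dict Int Int) (n : Int) :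
    List (List Int) × PySem.Dict Int Int :=
  let MODULO : Int := 1000000007
  let x := PySem.List.pyGetD A (n-1) 0
  let w := pvGet2 s.1 (k-1) (n-1) - s.2.getD x 0
  (pvSet2 s.1 k n (PySem.Int.mod (pvGet2 s.1 k (n-1) + w) MODULO),
   s.2.insert x (PySem.Int.mod (s.2.getD x 0 + w) MODULO))

-- body of "for k in range(2, 4)"
def aStage (A : List Int) (N : Int) (dp : List (List Int)) (k : Int) : List (List Int) :=
  let dp := pvSet2 dp k k 1
  let d : PySem.Dict Int Int := PySem.Dict.empty.insert (PySem.List.pyGetD A (k-1) 0) 1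
  ((PySem.List.pyRange (k+1) (N+1) 1).foldl (aInner A k) (dp, d)).1

def solution (A : List Int) : Int :=
  let N : Int := (A.length : Int)
  if A.length < 3 then 0
  else
    let s1 := (PySem.List.pyRange 1 (N+1) 1).foldl (aLoop1 A) (aInit N, PySem.Set.empty)
    let dp := (PySem.List.pyRange 2 4 1).foldl (aStage A N) s1.1
    pvGet2 dp 3 N

-- ===== PORT B =====
structure BState where
  n : Int
  c1 : Int
  c2 : Int
  c3 : Int
  seen : PySem.Set Int
  last2 : PySem.Dict Int Int
  last3 : PySem.Dict Int Int
  deriving Repr, DecidableEq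

-- loop body of B: one element, updating length 3 first, then length 2, then the distinct count
def bStep (s : BState) (x : Int) : BState :=
  let MOD : Int := 1000000007
  let n := s.n + 1
  let p3 : Int × PySem.Dict Int Int :=
    if n == 3 then (1, PySem.Dict.empty.insert x 1)
    else if n > 3 then
      let w := s.c2 - s.last3.getD x 0
      (PySem.Int.mod (s.c3 + w) MOD, s.last3.insert x (PySem.Int.mod (s.last3.getD x 0 + w) MOD))
    else (s.c3, s.last3)
  let p2 : Int × PySem.Dict Int Int :=
    if n == 2 then (1, PySem.Dict.empty.insert x 1)
    else if n > 2 then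
      let w := s.c1 - s.last2.getD x 0
      (PySem.Int.mod (s.c2 + w) MOD, s.last2.insert x (PySem.Int.mod (s.last2.getD x 0 + w) MOD))
    else (s.c2, s.last2)
  let seen := PySem.Set.add s.seen x
  ⟨n, (seen.length : Int), p2.1, p3.1, seen, p2.2, p3.2⟩

def solution_alt (A : List Int) : Int :=
  if A.length < 3 then 0
  else
    (A.foldl bStep ⟨0, 0, 0, 0, PySem.Set.empty, PySem.Dict.empty, PySem.Dict.empty⟩).c3

-- ===== PRECONDITION & SPEC =====
def Spec_solution (A : List Int) (out : Int) : Prop := out = solution_alt A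
instance (A : List Int) (out : Int) : Decidable (Spec_solution A out) := by unfold Spec_solution; infer_instance

-- ===== CLAIM (what is proved, stated in full; the proofs are below) =====
def Claim_equal_solution : Prop := ∀ (A : List Int), Dom_solution A → Spec_solution A (solution A)

-- ===== LEMMAS AND PROOFS =====

-- the common mathematical description both programs compute: distinct-subsequence counts by length
def MODC : Int := 1000000007

def r1v (A : List Int) (n : Nat) : Int := ((PySem.Set.ofList (A.take n)).length : Int)

def stepD (c : Int) (d : PySem.Dict Int Int) (prev x : Int) : Int × PySem.Dict Int Int :=
  let w := prev - d.getD x 0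
  (PySem.Int.mod (c + w) MODC, d.insert x (PySem.Int.mod (d.getD x 0 + w) MODC))

def g2 (A : List Int) : Nat → Int × PySem.Dict Int Int
  | 0 => (0, PySem.Dict.empty)
  | 1 => (0, PySem.Dict.empty)
  | 2 => (1, PySem.Dict.empty.insert (A.getD 1 0) 1)
  | (n+3) => stepD (g2 A (n+2)).1 (g2 A (n+2)).2 (r1v A (n+2)) (A.getD (n+2) 0)

def g3 (A : List Int) : Nat → Int × PySem.Dict Int Int
  | 0 => (0, PySem.Dict.empty)
  | 1 => (0, PySem.Dict.empty)
  | 2 => (0, PySem.Dict.empty)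
  | 3 => (1, PySem.Dict.empty.insert (A.getD 2 0) 1)
  | (n+4) => stepD (g3 A (n+3)).1 (g3 A (n+3)).2 ((g2 A (n+3)).1) (A.getD (n+3) 0)

-- row pictures of A's dp table
def mkrow (N : Nat) (f : Nat → Int) : List Int := (List.range (N+1)).map f

def dpShape (N : Nat) (a b c : Nat → Int) : List (List Int) :=
  [mkrow N (fun _ => 0), mkrow N a, mkrow N b, mkrow N c]

def updf (f : Nat → Int) (j : Nat) (v : Int) : Nat → Int := fun i => if i = j then v else f i

def p1f (A : List Int) (m : Nat) : Nat → Int := fun j => if 1 ≤ j ∧ j ≤ m then r1v A j else 0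
def q2f (A : List Int) (m : Nat) : Nat → Int := fun j => if 2 ≤ j ∧ j ≤ m then (g2 A j).1 else 0
def q3f (A : List Int) (m : Nat) : Nat → Int := fun j => if 3 ≤ j ∧ j ≤ m then (g3 A j).1 else 0


lemma ofList_take_succ (A : List Int) (n : Nat) (h : n < A.length) :
    PySem.Set.ofList (A.take (n+1)) = PySem.Set.add (PySem.Set.ofList (A.take n)) (A.getD n 0) := by
  rw [PySem.Set.ofList_eq_foldl, PySem.Set.ofList_eq_foldl, List.take_succ,
    List.getElem?_eq_getElem h, List.foldl_append]
  simp [List.getD_eq_getElem?_getD, List.getElem?_eq_getElem h]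

lemma set_mkrow (N : Nat) (f : Nat → Int) (j : Nat) (v : Int) :
    (mkrow N f).set j v = mkrow N (updf f j v) := by
  apply List.ext_getElem
  · simp [mkrow]
  · intro i h1 h2
    simp only [mkrow, List.length_map, List.length_range] at h2
    rw [List.getElem_set]
    simp only [mkrow, List.getElem_map, List.getElem_range, updf]
    split_ifs with h3 h4 h5 <;> first | rfl | omega

lemma get_mkrow (N : Nat) (f : Nat → Int) (j : Nat) (hj : j ≤ N) :
    PySem.List.pyGetD (mkrow N f) (j : Int) 0 = f j := by
  rw [PySem.List.pyGetD_natCast, mkrow, PySem.List.getD_map_range f (N+1) j 0 (by omega)]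

lemma pvGet2_shape1 (N : Nat) (a b c : Nat → Int) (j : Nat) (hj : j ≤ N) :
    pvGet2 (dpShape N a b c) 1 (j : Int) = a j := by
  rw [pvGet2, dpShape, PySem.List.pyGetD_ofNat' _ 1]
  rw [show [mkrow N (fun _ => 0), mkrow N a, mkrow N b, mkrow N c].getD 1 [] = mkrow N a by rfl]
  exact get_mkrow N a j hj

lemma pvGet2_shape2 (N : Nat) (a b c : Nat → Int) (j : Nat) (hj : j ≤ N) :
    pvGet2 (dpShape N a b c) 2 (j : Int) = b j := by
  rw [pvGet2, dpShape, PySem.List.pyGetD_ofNat' _ 2]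
  rw [show [mkrow N (fun _ => 0), mkrow N a, mkrow N b, mkrow N c].getD 2 [] = mkrow N b by rfl]
  exact get_mkrow N b j hj

lemma pvGet2_shape3 (N : Nat) (a b c : Nat → Int) (j : Nat) (hj : j ≤ N) :
    pvGet2 (dpShape N a b c) 3 (j : Int) = c j := by
  rw [pvGet2, dpShape, PySem.List.pyGetD_ofNat' _ 3]
  rw [show [mkrow N (fun _ => 0), mkrow N a, mkrow N b, mkrow N c].getD 3 [] = mkrow N c by rfl]
  exact get_mkrow N c j hj

lemma pvSet2_shape1 (N : Nat) (a b c : Nat → Int) (j : Nat) (v : Int) :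
    pvSet2 (dpShape N a b c) 1 (j : Int) v = dpShape N (updf a j v) b c := by
  rw [pvSet2, dpShape, PySem.List.pyGetD_ofNat' _ 1]
  rw [show [mkrow N (fun _ => 0), mkrow N a, mkrow N b, mkrow N c].getD 1 [] = mkrow N a by rfl]
  rw [PySem.List.pySetD_natCast, set_mkrow]
  rfl

lemma pvSet2_shape2 (N : Nat) (a b c : Nat → Int) (j : Nat) (v : Int) :
    pvSet2 (dpShape N a b c) 2 (j : Int) v = dpShape N a (updf b j v) c := by
  rw [pvSet2, dpShape, PySem.List.pyGetD_ofNat' _ 2]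
  rw [show [mkrow N (fun _ => 0), mkrow N a, mkrow N b, mkrow N c].getD 2 [] = mkrow N b by rfl]
  rw [PySem.List.pySetD_natCast, set_mkrow]
  rfl

lemma pvSet2_shape3 (N : Nat) (a b c : Nat → Int) (j : Nat) (v : Int) :
    pvSet2 (dpShape N a b c) 3 (j : Int) v = dpShape N a b (updf c j v) := by
  rw [pvSet2, dpShape, PySem.List.pyGetD_ofNat' _ 3]
  rw [show [mkrow N (fun _ => 0), mkrow N a, mkrow N b, mkrow N c].getD 3 [] = mkrow N c by rfl]
  rw [PySem.List.pySetD_natCast, set_mkrow]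
  rfl

lemma aInit_eq (N : Nat) : aInit (N : Int) = dpShape N (fun _ => 0) (fun _ => 0) (fun _ => 0) := by
  rw [aInit, PySem.List.pyRange_one 0 (N+1)]
  rw [show PySem.List.pyRange 0 4 1 = [0,1,2,3] by decide]
  simp only [List.map_map, List.map_cons, List.map_nil]
  rw [show ((N:Int) + 1 - 0).toNat = N + 1 by omega]
  rfl

lemma p1f_succ (A : List Int) (m : Nat) :
    updf (p1f A m) (m+1) (r1v A (m+1)) = p1f A (m+1) := by
  funext j
  simp only [updf, p1f]
  split_ifs <;> first | rfl | omega | (subst_vars; rfl)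

lemma loop1_inv (A : List Int) (m : Nat) (hm : m ≤ A.length) :
    (List.range m).foldl (fun s (k : Nat) => aLoop1 A s (1 + (k : Int)))
      (dpShape A.length (fun _ => 0) (fun _ => 0) (fun _ => 0), PySem.Set.empty)
    = (dpShape A.length (p1f A m) (fun _ => 0) (fun _ => 0), PySem.Set.ofList (A.take m)) := by
  induction m with
  | zero =>
      simp only [List.range_zero, List.foldl_nil, List.take_zero]
      have hp : p1f A 0 = fun _ => 0 := by
        funext j; simp only [p1f]; rw [if_neg (by omega)]
      rw [hp]
      rfl
  | succ m ih =>
      rw [List.range_succ, List.foldl_append, ih (by omega), List.foldl_cons, List.foldl_nil]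
      rw [aLoop1]
      simp only []
      rw [show (1 + (m:Int)) - 1 = ((m:Nat):Int) by omega]
      rw [PySem.List.pyGetD_natCast]
      rw [← ofList_take_succ A m (by omega)]
      rw [show (1 + (m:Int)) = (((m+1):Nat):Int) by omega]
      rw [pvSet2_shape1]
      rw [show ((PySem.Set.ofList (A.take (m+1))).length : Int) = r1v A (m+1) from rfl]
      rw [p1f_succ]

lemma q2f_seed (A : List Int) : updf (fun _ => (0:Int)) 2 1 = q2f A 2 := by
  funext j
  simp only [updf, q2f]
  split_ifs <;> first | rfl | omega | (subst_vars; rfl)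

lemma q2f_succ (A : List Int) (m : Nat) :
    updf (q2f A (m+2)) (m+3) ((g2 A (m+3)).1) = q2f A (m+3) := by
  funext j
  simp only [updf, q2f]
  split_ifs <;> first | rfl | omega | (subst_vars; rfl)

lemma stage2_inv' (A : List Int) (hN : 3 ≤ A.length) (m : Nat) (hm : m ≤ A.length - 2) :
    (List.range m).foldl (fun s (k : Nat) => aInner A 2 s (3 + (k : Int)))
      (dpShape A.length (p1f A A.length) (q2f A 2) (fun _ => 0), (g2 A 2).2)
    = (dpShape A.length (p1f A A.length) (q2f A (2+m)) (fun _ => 0), (g2 A (2+m)).2) := by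
  induction m with
  | zero => rfl
  | succ m ih =>
      rw [List.range_succ, List.foldl_append, ih (by omega), List.foldl_cons, List.foldl_nil]
      rw [aInner]
      simp only []
      rw [show (3 + (m:Int)) - 1 = (((2+m):Nat):Int) by omega]
      rw [show (2 - 1 : Int) = (1:Int) by norm_num]
      rw [PySem.List.pyGetD_natCast A (2+m) 0]
      rw [pvGet2_shape1 _ _ _ _ _ (by omega), pvGet2_shape2 _ _ _ _ _ (by omega)]
      rw [show p1f A A.length (2+m) = r1v A (2+m) from if_pos (by omega)]
      rw [show q2f A (2+m) (2+m) = (g2 A (2+m)).1 from if_pos (by omega)]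
      rw [show (3 + (m:Int)) = (((m+3):Nat):Int) by omega]
      rw [pvSet2_shape2]
      rw [show 2+m = m+2 from by omega]
      rw [show 2+(m+1) = m+3 from by omega]
      have hv : (g2 A (m+3)).1 = PySem.Int.mod ((g2 A (m + 2)).1 + (r1v A (m + 2) - (g2 A (m + 2)).2.getD (A.getD (m + 2) 0) 0)) 1000000007 := rfl
      rw [← hv, q2f_succ]
      rfl

lemma q3f_seed (A : List Int) : updf (fun _ => (0:Int)) 3 1 = q3f A 3 := by
  funext j
  simp only [updf, q3f]
  split_ifs <;> first | rfl | omega | (subst_vars; rfl)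

lemma q3f_succ (A : List Int) (m : Nat) :
    updf (q3f A (m+3)) (m+4) ((g3 A (m+4)).1) = q3f A (m+4) := by
  funext j
  simp only [updf, q3f]
  split_ifs <;> first | rfl | omega | (subst_vars; rfl)

lemma stage3_inv' (A : List Int) (hN : 3 ≤ A.length) (m : Nat) (hm : m ≤ A.length - 3) :
    (List.range m).foldl (fun s (k : Nat) => aInner A 3 s (4 + (k : Int)))
      (dpShape A.length (p1f A A.length) (q2f A A.length) (q3f A 3), (g3 A 3).2)
    = (dpShape A.length (p1f A A.length) (q2f A A.length) (q3f A (3+m)), (g3 A (3+m)).2) := by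
  induction m with
  | zero => rfl
  | succ m ih =>
      rw [List.range_succ, List.foldl_append, ih (by omega), List.foldl_cons, List.foldl_nil]
      rw [aInner]
      simp only []
      rw [show (4 + (m:Int)) - 1 = (((3+m):Nat):Int) by omega]
      rw [show (3 - 1 : Int) = (2:Int) by norm_num]
      rw [PySem.List.pyGetD_natCast A (3+m) 0]
      rw [pvGet2_shape2 _ _ _ _ _ (by omega), pvGet2_shape3 _ _ _ _ _ (by omega)]
      rw [show q2f A A.length (3+m) = (g2 A (3+m)).1 from if_pos (by omega)]
      rw [show q3f A (3+m) (3+m) = (g3 A (3+m)).1 from if_pos (by omega)]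
      rw [show (4 + (m:Int)) = (((m+4):Nat):Int) by omega]
      rw [pvSet2_shape3]
      rw [show 3+m = m+3 from by omega]
      rw [show 3+(m+1) = m+4 from by omega]
      have hv : (g3 A (m+4)).1 = PySem.Int.mod ((g3 A (m + 3)).1 + ((g2 A (m + 3)).1 - (g3 A (m + 3)).2.getD (A.getD (m + 3) 0) 0)) 1000000007 := rfl
      rw [← hv, q3f_succ]
      rfl

lemma solution_eq_g3' (A : List Int) (hN : 3 ≤ A.length) : solution A = (g3 A A.length).1 := by
  have hstage2 : aStage A (A.length:Int) (dpShape A.length (p1f A A.length) (fun _ => 0) (fun _ => 0)) 2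
      = dpShape A.length (p1f A A.length) (q2f A A.length) (fun _ => 0) := by
    rw [aStage]
    have h2 : pvSet2 (dpShape A.length (p1f A A.length) (fun _ => 0) (fun _ => 0)) 2 2 1
        = dpShape A.length (p1f A A.length) (q2f A 2) (fun _ => 0) := by
      have h := pvSet2_shape2 A.length (p1f A A.length) (fun _ => 0) (fun _ => 0) 2 1
      rw [show (((2:Nat)):Int) = (2:Int) by norm_num] at h
      rw [h, q2f_seed]
    rw [h2]
    rw [show ((2:Int) - 1) = (((1:Nat)):Int) by norm_num, PySem.List.pyGetD_natCast]
    rw [show ((2:Int) + 1) = (3:Int) by norm_num]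
    rw [PySem.List.pyRange_one 3 ((A.length:Int)+1)]
    rw [show (((A.length:Int))+1-3).toNat = A.length - 2 by omega]
    rw [List.foldl_map]
    have hd2 : (PySem.Dict.empty.insert (A.getD 1 0) (1:Int)) = (g2 A 2).2 := rfl
    rw [hd2, stage2_inv' A hN (A.length - 2) le_rfl]
    rw [show 2+(A.length-2) = A.length by omega]
  have hstage3 : aStage A (A.length:Int) (dpShape A.length (p1f A A.length) (q2f A A.length) (fun _ => 0)) 3
      = dpShape A.length (p1f A A.length) (q2f A A.length) (q3f A A.length) := by
    rw [aStage]
    have h3 : pvSet2 (dpShape A.length (p1f A A.length) (q2f A A.length) (fun _ => 0)) 3 3 1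
        = dpShape A.length (p1f A A.length) (q2f A A.length) (q3f A 3) := by
      have h := pvSet2_shape3 A.length (p1f A A.length) (q2f A A.length) (fun _ => 0) 3 1
      rw [show (((3:Nat)):Int) = (3:Int) by norm_num] at h
      rw [h, q3f_seed]
    rw [h3]
    rw [show ((3:Int) - 1) = (((2:Nat)):Int) by norm_num, PySem.List.pyGetD_natCast]
    rw [show ((3:Int) + 1) = (4:Int) by norm_num]
    rw [PySem.List.pyRange_one 4 ((A.length:Int)+1)]
    rw [show (((A.length:Int))+1-4).toNat = A.length - 3 by omega]
    rw [List.foldl_map]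
    have hd3 : (PySem.Dict.empty.insert (A.getD 2 0) (1:Int)) = (g3 A 3).2 := rfl
    rw [hd3, stage3_inv' A hN (A.length - 3) le_rfl]
    rw [show 3+(A.length-3) = A.length by omega]
  rw [solution]
  simp only []
  rw [if_neg (by omega)]
  rw [PySem.List.pyRange_one 1 ((A.length:Int)+1)]
  rw [show (((A.length:Int))+1-1).toNat = A.length by omega]
  rw [List.foldl_map, aInit_eq, loop1_inv A A.length le_rfl]
  rw [show PySem.List.pyRange 2 4 1 = [2,3] by decide]
  rw [List.foldl_cons, List.foldl_cons, List.foldl_nil]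
  rw [hstage2, hstage3]
  rw [pvGet2_shape3 _ _ _ _ _ le_rfl]
  exact if_pos (by omega)

lemma bStep_eq (A : List Int) (n : Nat) (hn : n < A.length) :
    bStep ⟨(n:Int), r1v A n, (g2 A n).1, (g3 A n).1, PySem.Set.ofList (A.take n), (g2 A n).2, (g3 A n).2⟩ (A.getD n 0)
    = ⟨(((n+1):Nat):Int), r1v A (n+1), (g2 A (n+1)).1, (g3 A (n+1)).1, PySem.Set.ofList (A.take (n+1)), (g2 A (n+1)).2, (g3 A (n+1)).2⟩ := by
  have hseen := ofList_take_succ A n hn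
  rcases n with _|_|_|m <;>
    (rw [bStep]
     simp only [beq_iff_eq]
     split_ifs <;>
       first
         | (exfalso; omega)
         | (rw [← hseen]; rfl))
lemma b_inv' (A : List Int) (n : Nat) (hn : n ≤ A.length) :
    (A.take n).foldl bStep ⟨0, 0, 0, 0, PySem.Set.empty, PySem.Dict.empty, PySem.Dict.empty⟩
    = ⟨(n : Int), r1v A n, (g2 A n).1, (g3 A n).1, PySem.Set.ofList (A.take n), (g2 A n).2, (g3 A n).2⟩ := by
  induction n with
  | zero => rfl
  | succ m ih =>
      conv_lhs => rw [List.take_succ, List.getElem?_eq_getElem (by omega : m < A.length)]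
      rw [List.foldl_append, ih (by omega)]
      simp only [Option.toList_some, List.foldl_cons, List.foldl_nil]
      rw [show A[m] = A.getD m 0 by rw [List.getD_eq_getElem?_getD, List.getElem?_eq_getElem (by omega : m < A.length)]; rfl]
      exact bStep_eq A m (by omega)

lemma solution_alt_eq_g3' (A : List Int) (hN : 3 ≤ A.length) : solution_alt A = (g3 A A.length).1 := by
  rw [solution_alt, if_neg (by omega)]
  have h := b_inv' A A.length le_rfl
  rw [List.take_length] at h
  rw [h]

-- ===== VERDICT (by name: the statement is the Claim_ definition above) =====
theorem solution_spec : Claim_equal_solution := by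
  intro A _
  unfold Spec_solution
  by_cases h : A.length < 3
  · simp [solution, solution_alt, h]
  · rw [solution_eq_g3' A (by omega), solution_alt_eq_g3' A (by omega)]
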